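-- pv_equiv track=rewrite | github.com/dezz1er/yandex_algo_training_s5 | homework3/D.py | calculate_line_length
-- ===== SOURCE A (Python) =====
-- def calculate_line_length(words, total_words, line_width):
--     line_count = 1
--     remaining_space = line_width
--     idx = 0
--     while idx < total_words:
--         if words[idx] > line_width:
--             return -1
--         if words[idx] <= remaining_space:
--             remaining_space -= (words[idx] + 1)
--         else:
--             idx -= 1
--             remaining_space = line_width
--             line_count += 1
--         idx += 1
--     return line_count
-- ===== SOURCE B (Python) =====
-- def calculate_line_length(words, total_words, line_width):
--     n = total_words
--     if any(words[i] > line_width for i in range(n)):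
--         return -1
--     prefix = [0]
--     for i in range(n):
--         prefix.append(prefix[-1] + words[i] + 1)
--     count = 0
--     i = 0
--     while i < n:
--         count += 1
--         j = i + 1
--         while j < n and prefix[j + 1] - prefix[i] <= line_width + 1:
--             j += 1
--         i = j
--     return max(count, 1)
-- ===== Notes on version B (the rewrite author's own statement) =====
-- stated objective: alternative
-- what changed: Replaces A's single running-remaining greedy loop with index rewinding by a staged algorithm: an oversize pre-scan, a prefix-sum array of word costs (w+1) built once, and a line-jumping pass that finds each line's extent by comparing prefix-sum differences against line_width+1, never maintaining a remaining-space counter.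
import Mathlib
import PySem

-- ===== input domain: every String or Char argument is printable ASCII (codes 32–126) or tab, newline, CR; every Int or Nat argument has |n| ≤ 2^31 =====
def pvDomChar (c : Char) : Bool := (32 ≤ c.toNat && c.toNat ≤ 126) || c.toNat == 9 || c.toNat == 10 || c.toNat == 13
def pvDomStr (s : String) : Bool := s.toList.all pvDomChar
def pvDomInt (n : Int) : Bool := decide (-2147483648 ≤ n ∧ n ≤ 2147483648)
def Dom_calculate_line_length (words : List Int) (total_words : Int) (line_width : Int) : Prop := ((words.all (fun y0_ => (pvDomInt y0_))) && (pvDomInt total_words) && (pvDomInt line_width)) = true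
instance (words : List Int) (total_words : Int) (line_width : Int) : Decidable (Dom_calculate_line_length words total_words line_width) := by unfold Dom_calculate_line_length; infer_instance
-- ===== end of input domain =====

-- B replaces A's index-rewinding single-state while loop by a staged algorithm: a prefix-sum
-- array of word costs is built first, then lines are counted by jumping from line start to
-- line start, each line's extent determined by comparing prefix-sum differences (objective: alternative).


-- ===== PORT A =====
-- A's while loop: state (line_count, remaining_space, idx); the else branch does
-- idx -= 1 … idx += 1, i.e. re-examines the SAME index with a fresh line.
-- words[idx] out of range = IndexError (excluded by Pre_); the port returns 0 there.
-- Termination: idx advances except in the reset step, which forces remaining = line_width.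
def pvLoopA (words : List Int) (total_words : Int) (line_width : Int)
    (line_count remaining idx : Int) : Int :=
  if _h : idx < total_words then
    match PySem.List.pyGet? words idx with
    | none => 0  -- IndexError in Python; outside Pre_
    | some w =>
      if w > line_width then -1
      else if w ≤ remaining then
        pvLoopA words total_words line_width line_count (remaining - (w + 1)) (idx + 1)
      else
        pvLoopA words total_words line_width (line_count + 1) line_width ((idx - 1) + 1)
  else line_count
  termination_by (2 * (total_words - idx)).toNat + (if remaining < line_width then 1 else 0)
  decreasing_by
  all_goals split_ifs <;> omega

def calculate_line_length (words : List Int) (total_words : Int) (line_width : Int) : Int :=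
  pvLoopA words total_words line_width 1 line_width 0

-- ===== PORT B =====
-- Source B, stage 1: any(words[i] > line_width for i in range(n)); out-of-range access
-- (IndexError, outside Pre_) is read with default 0.
def pvAnyOver (words : List Int) (n W : Int) : Bool :=
  (PySem.List.pyRange 0 n 1).any (fun i => PySem.List.pyGetD words i 0 > W)

-- Source B, stage 2: prefix = [0]; for i in range(n): prefix.append(prefix[-1] + words[i] + 1)
-- (prefix is never empty, so prefix[-1] = pyGetD prefix (-1) 0 is its last element).
def pvPrefix (words : List Int) (n : Int) : List Int :=
  (PySem.List.pyRange 0 n 1).foldl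
    (fun p i => p ++ [PySem.List.pyGetD p (-1) 0 + PySem.List.pyGetD words i 0 + 1]) [0]

-- Source B, stage 3 inner while: advance j while word j extends the line starting at i,
-- decided by the prefix-sum difference prefix[j+1] - prefix[i] <= W + 1.
def pvInnerB (pfx : List Int) (n W : Int) (i j : Int) : Int :=
  if _h : j < n ∧ PySem.List.pyGetD pfx (j + 1) 0 - PySem.List.pyGetD pfx i 0 ≤ W + 1 then
    pvInnerB pfx n W i (j + 1)
  else j
  termination_by (n - j).toNat
  decreasing_by omega

theorem pvInnerB_ge (pfx : List Int) (n W i j : Int) : j ≤ pvInnerB pfx n W i j := by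
  unfold pvInnerB
  split
  · have := pvInnerB_ge pfx n W i (j + 1); omega
  · omega
  termination_by (n - j).toNat
  decreasing_by omega

-- Source B, stage 3 outer while: count a line at each line start i, jump to the next start.
def pvOuterB (pfx : List Int) (n W : Int) (count i : Int) : Int :=
  if _h : i < n then pvOuterB pfx n W (count + 1) (pvInnerB pfx n W i (i + 1))
  else count
  termination_by (n - i).toNat
  decreasing_by
    have := pvInnerB_ge pfx n W i (i + 1); omega

def calculate_line_length_alt (words : List Int) (total_words : Int) (line_width : Int) : Int :=
  if pvAnyOver words total_words line_width then -1
  else max (pvOuterB (pvPrefix words total_words) total_words line_width 0 0) 1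

-- ===== PRECONDITION & SPEC =====
-- Pre_ = exactly the inputs where A returns (A raises IndexError iff total_words > len(words)
-- and no word exceeds line_width, since an oversized word makes it return -1 first).
def Pre_calculate_line_length (words : List Int) (total_words : Int) (line_width : Int) : Prop :=
  total_words ≤ (words.length : Int) ∨ ∃ w ∈ words, w > line_width
instance (words : List Int) (total_words : Int) (line_width : Int) : Decidable (Pre_calculate_line_length words total_words line_width) := by unfold Pre_calculate_line_length; infer_instance

def pvWitness_calculate_line_length : List Int × Int × Int := ([3, 2, 4], 3, 5)

def Spec_calculate_line_length (words : List Int) (total_words : Int) (line_width : Int) (out : Int) : Prop := out = calculate_line_length_alt words total_words line_width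
instance (words : List Int) (total_words : Int) (line_width : Int) (out : Int) : Decidable (Spec_calculate_line_length words total_words line_width out) := by unfold Spec_calculate_line_length; infer_instance

-- ===== CLAIM (what is proved, stated in full; the proofs are below) =====
def Claim_equal_calculate_line_length : Prop := ∀ (words : List Int) (total_words : Int) (line_width : Int), Dom_calculate_line_length words total_words line_width → Pre_calculate_line_length words total_words line_width → Spec_calculate_line_length words total_words line_width (calculate_line_length words total_words line_width)

-- ===== LEMMAS AND PROOFS =====

-- Reference for A's traversal as a list recursion: return -1 at the first oversized word.
def pvRef (line_width : Int) (remaining line_count : Int) : List Int → Int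
  | [] => line_count
  | w :: rest =>
    if w > line_width then -1
    else if w ≤ remaining then pvRef line_width (remaining - (w + 1)) line_count rest
    else pvRef line_width (line_width - (w + 1)) (line_count + 1) rest

-- The word-at-a-time greedy with explicit remaining (no oversized words present).
def pvPackB (line_width : Int) (remaining line_count : Int) : List Int → Int
  | [] => line_count
  | w :: rest =>
    if w ≤ remaining then pvPackB line_width (remaining - (w + 1)) line_count rest
    else pvPackB line_width (line_width - (w + 1)) (line_count + 1) rest

-- Cumulative cost of the first k words: S k = Σ_{t<k} (words[t] + 1).
def pvS (words : List Int) (k : Nat) : Int := ((words.take k).map (fun w => w + 1)).sum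

theorem pvRef_of_any (W r c : Int) (ws : List Int)
    (h : ws.any (fun w => w > W) = true) : pvRef W r c ws = -1 := by
  induction ws generalizing r c with
  | nil => simp at h
  | cons w rest ih =>
    simp only [List.any_cons, Bool.or_eq_true, decide_eq_true_eq] at h
    by_cases hw : w > W
    · simp [pvRef, hw]
    · have hrest : rest.any (fun w => w > W) = true := by
        rcases h with h | h
        · exact absurd h hw
        · exact h
      simp only [pvRef, if_neg hw]
      split <;> exact ih _ _ hrest

theorem pvRef_of_not_any (W r c : Int) (ws : List Int)
    (h : ws.any (fun w => w > W) = false) : pvRef W r c ws = pvPackB W r c ws := by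
  induction ws generalizing r c with
  | nil => rfl
  | cons w rest ih =>
    simp only [List.any_cons, Bool.or_eq_false_iff, decide_eq_false_iff_not] at h
    simp only [pvRef, pvPackB, if_neg h.1]
    split <;> exact ih _ _ h.2

-- Main invariant: starting at index k with state (r, c), the A-loop computes pvRef on the
-- rest of the truncated list, provided that scanning forward from k either stays within the
-- list (total_words ≤ len) or meets an oversized word before falling off the end.
theorem pvLoopA_eq_ref (words : List Int) (total_words line_width : Int)
    (k : Nat) (r c : Int)
    (hpre : total_words ≤ (words.length : Int) ∨
            ∃ j : Nat, k ≤ j ∧ j < words.length ∧ ∃ w, words[j]? = some w ∧ w > line_width) :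
    pvLoopA words total_words line_width c r (k : Int)
      = pvRef line_width r c ((words.take (max total_words 0).toNat).drop k) := by
  by_cases hk : (k : Int) < total_words
  · have hkL : k < words.length := by
      rcases hpre with h | ⟨j, hkj, hjL, _⟩
      · omega
      · omega
    obtain ⟨w, hw⟩ : ∃ w, words[k]? = some w := ⟨words[k], (List.getElem?_eq_getElem hkL)⟩
    have hget : PySem.List.pyGet? words (k : Int) = some w := by
      rw [PySem.List.pyGet?_natCast]; exact hw
    have hdrop : (words.take (max total_words 0).toNat).drop k
        = w :: (words.take (max total_words 0).toNat).drop (k + 1) := by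
      have hlt : k < (words.take (max total_words 0).toNat).length := by
        simp [List.length_take]; omega
      rw [List.drop_eq_getElem_cons hlt]
      congr 1
      rw [List.getElem_take]
      have := hw
      simp [List.getElem?_eq_getElem hkL] at this
      exact this
    rw [pvLoopA, dif_pos hk, hget]
    simp only []
    by_cases hov : w > line_width
    · rw [if_pos hov, hdrop]
      simp only [pvRef, if_pos hov]
    · rw [if_neg hov]
      have hpre' : total_words ≤ (words.length : Int) ∨
          ∃ j : Nat, k + 1 ≤ j ∧ j < words.length ∧ ∃ w', words[j]? = some w' ∧ w' > line_width := by
        rcases hpre with h | ⟨j, hkj, hjL, w', hw', hov'⟩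
        · exact Or.inl h
        · right
          refine ⟨j, ?_, hjL, w', hw', hov'⟩
          rcases Nat.eq_or_lt_of_le hkj with rfl | h
          · exfalso; rw [hw] at hw'; cases hw'; exact hov hov'
          · omega
      by_cases hfit : w ≤ r
      · rw [if_pos hfit]
        have hrec := pvLoopA_eq_ref words total_words line_width (k + 1) (r - (w + 1)) c hpre'
        have hcast : ((k : Int) + 1) = ((k + 1 : Nat) : Int) := by push_cast; ring
        rw [hcast, hrec, hdrop]
        simp only [pvRef, if_neg hov, if_pos hfit]
      · rw [if_neg hfit]
        have hfit2 : w ≤ line_width := by omega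
        have hkk : ((k : Int) - 1 + 1) = (k : Int) := by ring
        rw [hkk, pvLoopA, dif_pos hk, hget]
        simp only [if_neg hov, if_pos hfit2]
        have hrec := pvLoopA_eq_ref words total_words line_width (k + 1) (line_width - (w + 1)) (c + 1) hpre'
        have hcast : ((k : Int) + 1) = ((k + 1 : Nat) : Int) := by push_cast; ring
        rw [hcast, hrec, hdrop]
        simp only [pvRef, if_neg hov, if_neg hfit]
  · rw [pvLoopA, dif_neg hk]
    have hnil : (words.take (max total_words 0).toNat).drop k = [] := by
      apply List.drop_eq_nil_of_le
      simp [List.length_take]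
      omega
    rw [hnil]
    rfl
  termination_by (2 * (total_words - (k : Int))).toNat + (if r < line_width then 1 else 0)
  decreasing_by
  all_goals split_ifs <;> omega

-- Step identity for pvS inside the truncated list.
theorem pvS_succ (words : List Int) (k : Nat) (hk : k < words.length) :
    pvS words (k + 1) = pvS words k + words[k] + 1 := by
  unfold pvS
  rw [List.take_add_one, List.getElem?_eq_getElem hk, List.map_append, List.sum_append]
  simp only [Option.toList_some, List.map_cons, List.map_nil, List.sum_cons, List.sum_nil]
  ring

-- The fold building the prefix list produces the table of pvS values.
theorem pvPrefix_aux (words : List Int) (m : Nat) (hm : m ≤ words.length) :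
    (PySem.List.pyRange 0 (m : Int) 1).foldl
      (fun p i => p ++ [PySem.List.pyGetD p (-1) 0 + PySem.List.pyGetD words i 0 + 1]) [0]
      = (List.range (m + 1)).map (pvS words) := by
  induction m with
  | zero =>
    rw [PySem.List.pyRange_one_eq_nil (by norm_num)]
    simp [pvS]
  | succ m ih =>
    have hc : ((m + 1 : Nat) : Int) = (m : Int) + 1 := by push_cast; ring
    rw [hc, PySem.List.pyRange_one_succ_right (by positivity), List.foldl_append,
        ih (by omega)]
    simp only [List.foldl_cons, List.foldl_nil]
    have h1 : (List.range (m + 1)).map (pvS words)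
        = (List.range m).map (pvS words) ++ [pvS words m] := by
      rw [List.range_succ, List.map_append]; rfl
    have h2 : PySem.List.pyGetD ((List.range (m + 1)).map (pvS words)) (-1) 0 = pvS words m := by
      rw [h1, PySem.List.pyGetD_neg_one_append_singleton]
    have h3 : PySem.List.pyGetD words (m : Int) 0 = words[m]'(by omega) := by
      rw [PySem.List.pyGetD_eq_getElem _ _ (by omega) (by exact_mod_cast (by omega : m < words.length))]
      simp
    rw [h2, h3, ← pvS_succ words m (by omega)]
    simp [List.range_succ]

-- The prefix list is the table of pvS values.
theorem pvPrefix_eq (words : List Int) (n : Int) (hn : 0 ≤ n) (hlen : n ≤ (words.length : Int)) :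
    pvPrefix words n = (List.range (n.toNat + 1)).map (pvS words) := by
  unfold pvPrefix
  have hc : n = ((n.toNat : Nat) : Int) := by omega
  rw [hc]
  exact pvPrefix_aux words n.toNat (by omega)

-- Reading the prefix table at 0 ≤ k ≤ n gives pvS.
theorem pvPrefix_getD (words : List Int) (n : Int) (hn : 0 ≤ n) (hlen : n ≤ (words.length : Int))
    (k : Int) (h0 : 0 ≤ k) (hk : k ≤ n) :
    PySem.List.pyGetD (pvPrefix words n) k 0 = pvS words k.toNat := by
  rw [pvPrefix_eq _ _ hn hlen]
  have hc : k = ((k.toNat : Nat) : Int) := by omega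
  rw [hc, PySem.List.pyGetD_natCast]
  have hlt : k.toNat < n.toNat + 1 := by omega
  simp [List.getD, hlt]
  congr 1
  omega

-- pvOuterB with prefix-sum tests computes the same count as the remaining-based greedy.
theorem pvOuterB_eq_pack (words : List Int) (n W : Int) (hn : 0 ≤ n)
    (hlen : n ≤ (words.length : Int)) (i j : Nat) (hij : i < j) (hj : (j : Int) ≤ n) (c : Int) :
    pvOuterB (pvPrefix words n) n W c (pvInnerB (pvPrefix words n) n W (i : Int) (j : Int))
      = pvPackB W (W - (pvS words j - pvS words i)) c ((words.take n.toNat).drop j) := by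
  by_cases hjn : (j : Int) < n
  · have hjl : j < words.length := by omega
    have hjt : j < (words.take n.toNat).length := by simp [List.length_take]; omega
    have hcons : (words.take n.toNat).drop j
        = words[j] :: (words.take n.toNat).drop (j + 1) := by
      simp [List.drop_eq_getElem_cons hjt, List.getElem_take]
    have hgj : PySem.List.pyGetD (pvPrefix words n) ((j : Int) + 1) 0 = pvS words (j + 1) := by
      have hc : ((j : Int) + 1) = ((j + 1 : Nat) : Int) := by push_cast; ring
      rw [hc]
      exact (pvPrefix_getD words n hn hlen _ (by omega) (by omega)).trans (by congr 1 <;> omega)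
    have hgi : PySem.List.pyGetD (pvPrefix words n) (i : Int) 0 = pvS words i := by
      exact (pvPrefix_getD words n hn hlen _ (by omega) (by omega)).trans (by congr 1 <;> omega)
    have hstep : pvS words (j + 1) = pvS words j + words[j] + 1 := pvS_succ words j hjl
    have hcast : ((j : Int) + 1) = ((j + 1 : Nat) : Int) := by push_cast; ring
    rw [pvInnerB]
    by_cases hfit : words[j] ≤ W - (pvS words j - pvS words i)
    · rw [dif_pos ⟨hjn, by rw [hgj, hgi]; omega⟩, hcast]
      have ih := pvOuterB_eq_pack words n W hn hlen i (j + 1) (by omega) (by omega) c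
      rw [ih, hcons]
      simp only [pvPackB, if_pos hfit]
      congr 1
      rw [hstep]
      ring
    · rw [dif_neg (by rw [hgj, hgi]; push_neg; intro _; omega)]
      rw [pvOuterB, dif_pos hjn, hcast]
      have ih := pvOuterB_eq_pack words n W hn hlen j (j + 1) (by omega) (by omega) (c + 1)
      rw [ih, hcons]
      simp only [pvPackB, if_neg hfit]
      congr 1
      rw [hstep]
      ring
  · have hnil : (words.take n.toNat).drop j = [] := by
      apply List.drop_eq_nil_of_le
      simp [List.length_take]
      omega
    rw [hnil]
    rw [pvInnerB, dif_neg (by push_neg; intro h; omega)]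
    rw [pvOuterB, dif_neg hjn]
    rfl
  termination_by n.toNat - j

theorem pvOuterB_ge (pfx : List Int) (n W c i : Int) : c ≤ pvOuterB pfx n W c i := by
  unfold pvOuterB
  split
  · have := pvOuterB_ge pfx n W (c + 1) (pvInnerB pfx n W i (i + 1)); omega
  · omega
  termination_by (n - i).toNat
  decreasing_by
    have := pvInnerB_ge pfx n W i (i + 1); omega

-- Under Pre_, the index-based oversize scan agrees with the list-based one on the truncated list.
theorem pvAnyOver_eq (words : List Int) (n W : Int)
    (hpre : n ≤ (words.length : Int) ∨ ∃ w ∈ words, w > W) :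
    pvAnyOver words n W = (words.take (max n 0).toNat).any (fun w => w > W) := by
  unfold pvAnyOver
  cases hb : (words.take (max n 0).toNat).any (fun w => w > W) with
  | true =>
    rw [List.any_eq_true] at hb
    obtain ⟨w, hmem, hw⟩ := hb
    obtain ⟨k, hk, hkw⟩ := List.getElem_of_mem hmem
    have hkl : k < (max n 0).toNat ∧ k < words.length := by
      simp [List.length_take] at hk; omega
    rw [List.any_eq_true]
    refine ⟨(k : Int), ?_, ?_⟩
    · rw [PySem.List.mem_pyRange_one]; constructor <;> omega
    · rw [PySem.List.pyGetD_eq_getElem _ _ (by omega) (by exact_mod_cast hkl.2)]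
      have h2 := hkw
      rw [List.getElem_take] at h2
      simp only [Int.toNat_natCast]
      simp [h2, hw]
  | false =>
    rw [List.any_eq_false] at hb
    rw [List.any_eq_false]
    intro i hi
    rw [PySem.List.mem_pyRange_one] at hi
    simp only [decide_eq_true_eq]
    by_cases hil : i < (words.length : Int)
    · rw [PySem.List.pyGetD_eq_getElem _ _ hi.1 hil]
      have hmem : words[i.toNat] ∈ words.take (max n 0).toNat := by
        apply List.mem_take_iff_getElem.mpr
        exact ⟨i.toNat, by omega, rfl⟩
      have := hb _ hmem
      simpa using this
    · -- out-of-range read: default 0; Pre_ forces an oversized word, contradicting hb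
      exfalso
      rcases hpre with h | ⟨w, hmem, hw⟩
      · omega
      · have htk : words.take (max n 0).toNat = words := by
          apply List.take_of_length_le; omega
        rw [htk] at hb
        have := hb w hmem
        simp at this
        omega

-- ===== VERDICT (by name: the statement is the Claim_ definition above) =====
theorem calculate_line_length_spec : Claim_equal_calculate_line_length := by
  intro words n W _ hpre
  unfold Spec_calculate_line_length calculate_line_length
  have hpre' : n ≤ (words.length : Int) ∨
      ∃ j : Nat, 0 ≤ j ∧ j < words.length ∧ ∃ w, words[j]? = some w ∧ w > W := by
    rcases hpre with h | ⟨w, hmem, hov⟩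
    · exact Or.inl h
    · obtain ⟨j, hj, hwj⟩ := List.getElem_of_mem hmem
      exact Or.inr ⟨j, Nat.zero_le _, hj, w, by rw [List.getElem?_eq_getElem hj, hwj], hov⟩
  have hA : pvLoopA words n W 1 W 0 = pvRef W W 1 (words.take (max n 0).toNat) := by
    have := pvLoopA_eq_ref words n W 0 W 1 hpre'
    simpa using this
  rw [hA]
  unfold calculate_line_length_alt
  rw [pvAnyOver_eq words n W hpre]
  cases hany : (words.take (max n 0).toNat).any (fun w => w > W) with
  | true => simp only [if_true]; exact pvRef_of_any _ _ _ _ hany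
  | false =>
    simp only [Bool.false_eq_true, if_false]
    have hlen : n ≤ (words.length : Int) := by
      by_contra hn0
      rcases hpre with h | ⟨w, hmem, hov⟩
      · exact hn0 h
      · have htk : (words.take (max n 0).toNat) = words := by
          apply List.take_of_length_le; omega
        rw [htk] at hany
        rw [List.any_eq_false] at hany
        have := hany w hmem
        simp at this
        omega
    by_cases hn : 0 < n
    · -- nonempty case
      have hmx : (max n 0).toNat = n.toNat := by omega
      rw [hmx] at hany ⊢
      have hv : pvRef W W 1 (words.take n.toNat) = pvPackB W W 1 (words.take n.toNat) :=
        pvRef_of_not_any _ _ _ _ hany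
      have h0len : 0 < words.length := by omega
      have htk0 : (words.take n.toNat).drop 0 = words.take n.toNat := rfl
      have hcons : words.take n.toNat = words[0] :: (words.take n.toNat).drop 1 := by
        have hlt : 0 < (words.take n.toNat).length := by
          simp [List.length_take]; omega
        conv_lhs => rw [← htk0, List.drop_eq_getElem_cons hlt]
        congr 1
        rw [List.getElem_take]
      have hw0 : words[0] ≤ W := by
        rw [List.any_eq_false] at hany
        have hmem0 : words[0] ∈ words.take n.toNat := by
          rw [hcons]; exact List.mem_cons_self
        have := hany _ hmem0
        simpa using this
      have hS : pvS words 1 - pvS words 0 = words[0] + 1 := by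
        have := pvS_succ words 0 h0len
        simp [pvS] at this ⊢
        omega
      have hpk : pvPackB W W 1 (words.take n.toNat)
          = pvPackB W (W - (pvS words 1 - pvS words 0)) 1 ((words.take n.toNat).drop 1) := by
        conv_lhs => rw [hcons]
        simp only [pvPackB, if_pos hw0]
        rw [hS]
      have hout : pvOuterB (pvPrefix words n) n W 0 0
          = pvOuterB (pvPrefix words n) n W 1 (pvInnerB (pvPrefix words n) n W 0 1) := by
        rw [pvOuterB, dif_pos hn]
        norm_num
      have heq := pvOuterB_eq_pack words n W (by omega) hlen 0 1 (by omega) (by exact_mod_cast hn) 1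
      have hge : (1 : Int) ≤ pvOuterB (pvPrefix words n) n W 0 0 := by
        rw [hout]; exact pvOuterB_ge _ _ _ _ _
      rw [hv, hpk, ← heq]
      push_cast at hout ⊢
      rw [← hout]
      omega
    · -- n ≤ 0: one (empty) line
      have hmx : (max n 0).toNat = 0 := by omega
      rw [hmx]
      simp only [List.take_zero, pvRef]
      have h0 : pvOuterB (pvPrefix words n) n W 0 0 = 0 := by
        rw [pvOuterB, dif_neg (by omega)]
      rw [h0]
      norm_num
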